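-- pv_equiv track=rewrite | github.com/annugoyall/DSA | Practice/balance_row_col/solution.py | solution
-- ===== SOURCE A (Python) =====
-- def solution(r1, r2):
--     count = {'R':0, 'W':0}
--     l = len(r1)
--     blank = 0
--     replacements = 0
--     for i in range(l):
--
--         if r1[i] == '?' and r2[i] =='?':
--             blank += 1
--             continue
--
--         if r1[i] == r2[i]:
--             return -1
--
--         if r1[i] + r2[i] == 'WR':
--             count['W'] += 1
--             count['R'] -= 1
--             continue
--
--         if r1[i] + r2[i] == 'RW':
--             count['R'] += 1
--             count['W'] -= 1
--             continue
--
--         if r1[i] == 'R' or r2[i] == 'W':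
--             count['R'] += 1
--             count['W'] -= 1
--         elif r1[i] == 'W' or r2[i] == 'R':
--             count['W'] += 1
--             count['R'] -= 1
--         replacements += 1
--
--     diff = abs(count['R']-count['W'])
--
--     if diff > blank*2:
--         return -1
--
--     return replacements + diff
-- ===== SOURCE B (Python) =====
-- def solution(r1, r2):
--     # Frequency / inclusion-exclusion formulation: count the four pair kinds
--     # and the R/W character frequencies once, then combine by closed formula,
--     # instead of A's per-position counter cascade.
--     c1 = list(r1)
--     n = len(c1)
--     c2 = list(r2[:n])
--     pairs = list(zip(c1, c2))
--     if any(a == b != '?' for a, b in pairs):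
--         return -1
--     blank = pairs.count(('?', '?'))
--     wr = pairs.count(('W', 'R'))
--     rw = pairs.count(('R', 'W'))
--     net = (c1.count('R') + c2.count('W') - rw) - (c1.count('W') + c2.count('R') - wr)
--     if abs(net) > blank:
--         return -1
--     return (n - blank - wr - rw) + 2 * abs(net)
-- ===== Notes on version B (the rewrite author's own statement) =====
-- stated objective: alternative
-- what changed: A's single fused loop carrying a mirrored two-key R/W counter dict, a blank counter and a replacement counter through an early-return branch cascade is replaced by a frequency formulation: one validity test over the zipped pairs, then counts of the blank, WR and RW pair kinds and of the R/W character frequencies of each row, combined by the inclusion-exclusion closed formula net = (#R in row1 + #W in row2 - rw) - (#W in row1 + #R in row2 - wr) and result (n - blank - wr - rw) + 2*abs(net) unless abs(net) exceeds blank.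
import Mathlib
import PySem

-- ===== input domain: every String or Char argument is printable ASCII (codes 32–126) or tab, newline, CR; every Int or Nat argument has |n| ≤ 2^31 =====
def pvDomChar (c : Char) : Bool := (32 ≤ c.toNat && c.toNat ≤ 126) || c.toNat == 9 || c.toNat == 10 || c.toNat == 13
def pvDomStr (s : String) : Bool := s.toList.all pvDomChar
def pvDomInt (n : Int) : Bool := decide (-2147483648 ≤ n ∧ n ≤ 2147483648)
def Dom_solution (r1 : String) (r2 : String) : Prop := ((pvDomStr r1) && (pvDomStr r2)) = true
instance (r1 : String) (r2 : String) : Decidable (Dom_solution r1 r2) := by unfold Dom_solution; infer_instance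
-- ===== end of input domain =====

-- B replaces A's fused per-position loop (mirrored R/W dict counters, early-return cascade) by a
-- frequency formulation: count the pair kinds and R/W character frequencies once and combine them
-- by an inclusion-exclusion closed formula; objective: alternative algorithm, same O(n) cost.

-- ===== PORT A =====
-- A's loop over range(len(r1)); the fixed two-key dict {'R':…,'W':…} is carried as the two
-- variables cR, cW; `none` = the IndexError Python raises on r2[i] out of range.
def solLoopA (c1 c2 : List Char) : Nat → Nat → Int → Int → Int → Int → Option Int
  | 0, _, cR, cW, blank, repl =>
      -- diff = abs(count['R']-count['W']); if diff > blank*2: return -1; return replacements+diff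
      some (if |cR - cW| > blank * 2 then -1 else repl + |cR - cW|)
  | fuel+1, i, cR, cW, blank, repl =>
      match PySem.List.pyGet? c1 (i : Int), PySem.List.pyGet? c2 (i : Int) with
      | some a, some b =>
          if a = '?' ∧ b = '?' then solLoopA c1 c2 fuel (i+1) cR cW (blank+1) repl
          else if a = b then some (-1)
          else if a = 'W' ∧ b = 'R' then solLoopA c1 c2 fuel (i+1) (cR-1) (cW+1) blank repl
          else if a = 'R' ∧ b = 'W' then solLoopA c1 c2 fuel (i+1) (cR+1) (cW-1) blank repl
          else if a = 'R' ∨ b = 'W' then solLoopA c1 c2 fuel (i+1) (cR+1) (cW-1) blank (repl+1)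
          else if a = 'W' ∨ b = 'R' then solLoopA c1 c2 fuel (i+1) (cR-1) (cW+1) blank (repl+1)
          else solLoopA c1 c2 fuel (i+1) cR cW blank (repl+1)
      | _, _ => none   -- IndexError (excluded by Pre_solution; the 0 below is never a claimed value)

def solution (r1 : String) (r2 : String) : Int :=
  (solLoopA r1.toList r2.toList r1.toList.length 0 0 0 0 0).getD 0

-- ===== PORT B =====
def solution_alt (r1 : String) (r2 : String) : Int :=
  let c1 := r1.toList
  let n := c1.length
  let c2 := PySem.List.slice r2.toList none (some (n : Int))   -- r2[:n]
  let pairs := c1.zip c2                                       -- list(zip(c1, c2))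
  if pairs.any (fun p => p.1 == p.2 && p.1 != '?') then -1     -- any(a == b != '?' …)
  else
    let blank : Int := pairs.count ('?', '?')
    let wr : Int := pairs.count ('W', 'R')
    let rw : Int := pairs.count ('R', 'W')
    let net : Int := ((c1.count 'R' : Int) + (c2.count 'W' : Int) - rw)
                   - ((c1.count 'W' : Int) + (c2.count 'R' : Int) - wr)
    if |net| > blank then -1
    else ((n : Int) - blank - wr - rw) + 2 * |net|

-- ===== PRECONDITION & SPEC =====
-- Pre_ excludes exactly the inputs where Python A raises IndexError (r2 shorter than r1 and no
-- invalid column before r2 ends).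
def Pre_solution (r1 : String) (r2 : String) : Prop :=
  r1.toList.length ≤ r2.toList.length ∨
  ∃ i ∈ List.range r2.toList.length,
    i < r1.toList.length ∧ r1.toList.getD i ' ' = r2.toList.getD i ' ' ∧ r1.toList.getD i ' ' ≠ '?'
instance (r1 : String) (r2 : String) : Decidable (Pre_solution r1 r2) := by unfold Pre_solution; infer_instance

def pvWitness_solution : String × String := ("R?W", "WRR")

def Spec_solution (r1 : String) (r2 : String) (out : Int) : Prop := out = solution_alt r1 r2
instance (r1 : String) (r2 : String) (out : Int) : Decidable (Spec_solution r1 r2 out) := by unfold Spec_solution; infer_instance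

-- ===== CLAIM (what is proved, stated in full; the proofs are below) =====
def Claim_equal_solution : Prop := ∀ (r1 : String) (r2 : String), Dom_solution r1 r2 → Pre_solution r1 r2 → Spec_solution r1 r2 (solution r1 r2)

-- ===== LEMMAS AND PROOFS =====

-- Proof-side decomposition of A's loop: an index-based validity scan plus three index-based
-- aggregates; loopA_eq below characterises A's loop with them, and the later lemmas identify
-- them with B's zip/count formulation.
def anyInvalidB (c1 c2 : List Char) : Nat → Nat → Option Bool
  | 0, _ => some false
  | fuel+1, i =>
      match PySem.List.pyGet? c1 (i : Int), PySem.List.pyGet? c2 (i : Int) with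
      | some a, some b => if a = b ∧ a ≠ '?' then some true else anyInvalidB c1 c2 fuel (i+1)
      | _, _ => none

def bBlank (c1 c2 : List Char) (is : List Nat) : Int :=
  ((is.filter fun i => decide (c1.getD i ' ' = '?' ∧ c2.getD i ' ' = '?')).length : Int)

def bNet (c1 c2 : List Char) (is : List Nat) : Int :=
  (is.map fun i =>
    (if c1.getD i ' ' = 'R' ∨ c2.getD i ' ' = 'W' then (1:Int) else 0) -
    (if c1.getD i ' ' = 'W' ∨ c2.getD i ' ' = 'R' then (1:Int) else 0)).sum

def bRepl (c1 c2 : List Char) (is : List Nat) : Int :=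
  ((is.filter fun i => decide (
      ¬(c1.getD i ' ' = '?' ∧ c2.getD i ' ' = '?') ∧
      ¬(c1.getD i ' ' = 'W' ∧ c2.getD i ' ' = 'R') ∧
      ¬(c1.getD i ' ' = 'R' ∧ c2.getD i ' ' = 'W'))).length : Int)

def finishB (inv : Option Bool) (net bl rp : Int) : Option Int :=
  match inv with
  | none => none
  | some true => some (-1)
  | some false => some (if |net - -net| > bl * 2 then -1 else rp + |net - -net|)

lemma bNet_cons (c1 c2 : List Char) (i : Nat) (is : List Nat) :
    bNet c1 c2 (i :: is) =
      ((if c1.getD i ' ' = 'R' ∨ c2.getD i ' ' = 'W' then (1:Int) else 0) -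
       (if c1.getD i ' ' = 'W' ∨ c2.getD i ' ' = 'R' then (1:Int) else 0)) + bNet c1 c2 is := by
  simp [bNet]

lemma bBlank_cons (c1 c2 : List Char) (i : Nat) (is : List Nat) :
    bBlank c1 c2 (i :: is) =
      (if c1.getD i ' ' = '?' ∧ c2.getD i ' ' = '?' then (1:Int) else 0) + bBlank c1 c2 is := by
  by_cases h : c1.getD i ' ' = '?' ∧ c2.getD i ' ' = '?'
  · have hd : decide (c1.getD i ' ' = '?' ∧ c2.getD i ' ' = '?') = true := by rw [decide_eq_true_iff]; exact h
    simp only [bBlank, List.filter_cons, hd, if_pos h, if_true, List.length_cons]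
    push_cast; ring
  · have hd : decide (c1.getD i ' ' = '?' ∧ c2.getD i ' ' = '?') = false := by simpa using h
    simp only [bBlank, List.filter_cons, hd, if_neg h, Bool.false_eq_true, if_false]
    ring

lemma bRepl_cons (c1 c2 : List Char) (i : Nat) (is : List Nat) :
    bRepl c1 c2 (i :: is) =
      (if ¬(c1.getD i ' ' = '?' ∧ c2.getD i ' ' = '?') ∧
          ¬(c1.getD i ' ' = 'W' ∧ c2.getD i ' ' = 'R') ∧
          ¬(c1.getD i ' ' = 'R' ∧ c2.getD i ' ' = 'W') then (1:Int) else 0) + bRepl c1 c2 is := by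
  by_cases h : ¬(c1.getD i ' ' = '?' ∧ c2.getD i ' ' = '?') ∧
      ¬(c1.getD i ' ' = 'W' ∧ c2.getD i ' ' = 'R') ∧
      ¬(c1.getD i ' ' = 'R' ∧ c2.getD i ' ' = 'W')
  · have hd : decide (¬(c1.getD i ' ' = '?' ∧ c2.getD i ' ' = '?') ∧
        ¬(c1.getD i ' ' = 'W' ∧ c2.getD i ' ' = 'R') ∧
        ¬(c1.getD i ' ' = 'R' ∧ c2.getD i ' ' = 'W')) = true := by rw [decide_eq_true_iff]; exact h
    simp only [bRepl, List.filter_cons, hd, if_pos h, if_true, List.length_cons]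
    push_cast; ring
  · have hd : decide (¬(c1.getD i ' ' = '?' ∧ c2.getD i ' ' = '?') ∧
        ¬(c1.getD i ' ' = 'W' ∧ c2.getD i ' ' = 'R') ∧
        ¬(c1.getD i ' ' = 'R' ∧ c2.getD i ' ' = 'W')) = false := by
      rw [decide_eq_false_iff_not]; exact h
    simp only [bRepl, List.filter_cons, hd, if_neg h, Bool.false_eq_true, if_false]
    ring

-- Main invariant: A's loop from index i with `fuel` remaining steps and state (cR, -cR, blank,
-- repl) equals the index-based decomposition over the same index segment.
lemma loopA_eq (c1 c2 : List Char) :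
    ∀ (fuel i : Nat) (cR blank repl : Int),
      solLoopA c1 c2 fuel i cR (-cR) blank repl =
        finishB (anyInvalidB c1 c2 fuel i)
          (cR + bNet c1 c2 (List.range' i fuel))
          (blank + bBlank c1 c2 (List.range' i fuel))
          (repl + bRepl c1 c2 (List.range' i fuel)) := by
  intro fuel
  induction fuel with
  | zero =>
      intro i cR blank repl
      simp [solLoopA, anyInvalidB, finishB, bNet, bBlank, bRepl]
  | succ fuel ih =>
      intro i cR blank repl
      rw [List.range'_succ]
      try rw [Nat.add_comm 1 i]
      by_cases h1 : PySem.List.pyGet? c1 (i : Int) = none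
      · simp [solLoopA, anyInvalidB, h1, finishB]
      · obtain ⟨a, ha⟩ := Option.ne_none_iff_exists'.mp h1
        by_cases h2 : PySem.List.pyGet? c2 (i : Int) = none
        · simp [solLoopA, anyInvalidB, ha, h2, finishB]
        · obtain ⟨b, hb⟩ := Option.ne_none_iff_exists'.mp h2
          have hga : c1.getD i ' ' = a := by
            have h := ha; rw [PySem.List.pyGet?_natCast] at h
            simp [List.getD, h]
          have hgb : c2.getD i ' ' = b := by
            have h := hb; rw [PySem.List.pyGet?_natCast] at h
            simp [List.getD, h]
          rw [bNet_cons, bBlank_cons, bRepl_cons, hga, hgb]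
          by_cases hbl : a = '?' ∧ b = '?'
          · have hinv : anyInvalidB c1 c2 (fuel+1) i = anyInvalidB c1 c2 fuel (i+1) := by
              simp only [anyInvalidB, ha, hb]
              rw [if_neg (fun h => h.2 hbl.1)]
            have hn1 : ¬ (a = 'R' ∨ b = 'W') := by
              rintro (h | h)
              · exact absurd (hbl.1.symm.trans h) (by decide)
              · exact absurd (hbl.2.symm.trans h) (by decide)
            have hn2 : ¬ (a = 'W' ∨ b = 'R') := by
              rintro (h | h)
              · exact absurd (hbl.1.symm.trans h) (by decide)
              · exact absurd (hbl.2.symm.trans h) (by decide)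
            simp only [solLoopA, ha, hb, if_pos hbl]
            rw [ih (i+1) cR (blank+1) repl, hinv,
              if_neg hn1, if_neg hn2,
              if_neg (show ¬(¬(a = '?' ∧ b = '?') ∧ ¬(a = 'W' ∧ b = 'R') ∧ ¬(a = 'R' ∧ b = 'W')) from fun hc => hc.1 hbl)]
            congr 1 <;> ring
          · by_cases heq : a = b
            · have hq : a ≠ '?' := fun h => hbl ⟨h, heq ▸ h⟩
              have hinv : anyInvalidB c1 c2 (fuel+1) i = some true := by
                simp only [anyInvalidB, ha, hb]
                rw [if_pos ⟨heq, hq⟩]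
              simp only [solLoopA, ha, hb, if_neg hbl, if_pos heq]
              rw [hinv]
              simp [finishB]
            · have hinv : anyInvalidB c1 c2 (fuel+1) i = anyInvalidB c1 c2 fuel (i+1) := by
                simp only [anyInvalidB, ha, hb]
                rw [if_neg (fun h => heq h.1)]
              rw [hinv]
              simp only [solLoopA, ha, hb, if_neg hbl, if_neg heq]
              by_cases hWR : a = 'W' ∧ b = 'R'
              · rw [if_pos hWR]
                have hn1 : ¬ (a = 'R' ∨ b = 'W') := by
                  rintro (h | h)
                  · exact absurd (hWR.1.symm.trans h) (by decide)
                  · exact absurd (hWR.2.symm.trans h) (by decide)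
                rw [show (-cR + 1 : Int) = -(cR - 1) by ring,
                  ih (i+1) (cR-1) blank repl,
                  if_neg hn1, if_pos (Or.inl hWR.1),
                  if_neg (show ¬(¬(a = '?' ∧ b = '?') ∧ ¬(a = 'W' ∧ b = 'R') ∧ ¬(a = 'R' ∧ b = 'W')) from fun hc => hc.2.1 hWR)]
                congr 1 <;> ring
              · rw [if_neg hWR]
                by_cases hRW : a = 'R' ∧ b = 'W'
                · rw [if_pos hRW]
                  have hn2 : ¬ (a = 'W' ∨ b = 'R') := by
                    rintro (h | h)
                    · exact absurd (hRW.1.symm.trans h) (by decide)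
                    · exact absurd (hRW.2.symm.trans h) (by decide)
                  rw [show (-cR - 1 : Int) = -(cR + 1) by ring,
                    ih (i+1) (cR+1) blank repl,
                    if_pos (Or.inl hRW.1), if_neg hn2,
                    if_neg (show ¬(¬(a = '?' ∧ b = '?') ∧ ¬(a = 'W' ∧ b = 'R') ∧ ¬(a = 'R' ∧ b = 'W')) from fun hc => hc.2.2 hRW)]
                  congr 1 <;> ring
                · rw [if_neg hRW]
                  by_cases hR : a = 'R' ∨ b = 'W'
                  · rw [if_pos hR]
                    have hn2 : ¬ (a = 'W' ∨ b = 'R') := by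
                      rintro (h | h) <;> rcases hR with h' | h'
                      · exact absurd (h.symm.trans h') (by decide)
                      · exact heq (h.trans h'.symm)
                      · exact heq (h'.trans h.symm)
                      · exact absurd (h.symm.trans h') (by decide)
                    rw [show (-cR - 1 : Int) = -(cR + 1) by ring,
                      ih (i+1) (cR+1) blank (repl+1),
                      if_pos hR, if_neg hn2,
                      if_pos ⟨hbl, hWR, hRW⟩]
                    congr 1 <;> ring
                  · rw [if_neg hR]
                    by_cases hW : a = 'W' ∨ b = 'R'
                    · rw [if_pos hW]
                      rw [show (-cR + 1 : Int) = -(cR - 1) by ring,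
                        ih (i+1) (cR-1) blank (repl+1),
                        if_neg hR, if_pos hW,
                        if_pos ⟨hbl, hWR, hRW⟩]
                      congr 1 <;> ring
                    · rw [if_neg hW]
                      rw [ih (i+1) cR blank (repl+1),
                        if_neg hR, if_neg hW,
                        if_pos ⟨hbl, hWR, hRW⟩]
                      congr 1 <;> ring

-- The validity scan agrees with B's `any` over the zipped pairs.
lemma anyInv_some_any (c1 c2 : List Char) :
    ∀ (fuel i : Nat) (v : Bool), anyInvalidB c1 c2 fuel i = some v →
      (((c1.drop i).zip (c2.drop i)).take fuel).any (fun p => p.1 == p.2 && p.1 != '?') = v := by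
  intro fuel
  induction fuel with
  | zero => intro i v h; simp [anyInvalidB] at h; simp [h.symm]
  | succ fuel ih =>
      intro i v h
      cases ha : PySem.List.pyGet? c1 (i : Int) with
      | none => simp only [anyInvalidB, ha] at h; exact absurd h (by simp)
      | some a =>
        cases hb : PySem.List.pyGet? c2 (i : Int) with
        | none => simp only [anyInvalidB, ha, hb] at h; exact absurd h (by simp)
        | some b =>
          simp only [anyInvalidB, ha, hb] at h
          rw [PySem.List.pyGet?_natCast] at ha hb
          have h1 : i < c1.length := by
            by_contra hc; simp [List.getElem?_eq_none (by omega : c1.length ≤ i)] at ha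
          have h2 : i < c2.length := by
            by_contra hc; simp [List.getElem?_eq_none (by omega : c2.length ≤ i)] at hb
          have ea : c1[i] = a := by
            have := ha; rw [List.getElem?_eq_getElem h1] at this; exact Option.some.inj this
          have eb : c2[i] = b := by
            have := hb; rw [List.getElem?_eq_getElem h2] at this; exact Option.some.inj this
          rw [List.drop_eq_getElem_cons h1, List.drop_eq_getElem_cons h2, ea, eb,
            List.zip_cons_cons, List.take_succ_cons, List.any_cons]
          by_cases hinv : a = b ∧ a ≠ '?'
          · rw [if_pos hinv] at h
            have hv : v = true := by simpa using h.symm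
            subst hv
            simp only [List.any_eq_true, Bool.and_eq_true, beq_iff_eq, bne_iff_ne, List.any_cons,
              Bool.or_eq_true]
            left
            exact ⟨by simp [hinv.1], hinv.2⟩
          · rw [if_neg hinv] at h
            have := ih (i+1) v h
            rw [this]
            have : ¬ (a == b && a != '?') = true := by
              simp only [Bool.and_eq_true, beq_iff_eq, bne_iff_ne]; exact hinv
            simp only [Bool.or_eq_true]
            cases hx : (a == b && a != '?') <;> simp_all

lemma anyInv_false_inrange (c1 c2 : List Char) :
    ∀ (fuel i : Nat), anyInvalidB c1 c2 fuel i = some false →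
      ∀ j, i ≤ j → j < i + fuel → j < c1.length ∧ j < c2.length := by
  intro fuel
  induction fuel with
  | zero => intro i h j h1 h2; omega
  | succ fuel ih =>
      intro i h j h1 h2
      cases ha : PySem.List.pyGet? c1 (i : Int) with
      | none => simp only [anyInvalidB, ha] at h; exact absurd h (by simp)
      | some a =>
        cases hb : PySem.List.pyGet? c2 (i : Int) with
        | none => simp only [anyInvalidB, ha, hb] at h; exact absurd h (by simp)
        | some b =>
          simp only [anyInvalidB, ha, hb] at h
          rw [PySem.List.pyGet?_natCast] at ha hb
          have h1' : i < c1.length := by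
            by_contra hc; simp [List.getElem?_eq_none (by omega : c1.length ≤ i)] at ha
          have h2' : i < c2.length := by
            by_contra hc; simp [List.getElem?_eq_none (by omega : c2.length ≤ i)] at hb
          by_cases hinv : a = b ∧ a ≠ '?'
          · rw [if_pos hinv] at h; simp at h
          · rw [if_neg hinv] at h
            rcases Nat.eq_or_lt_of_le h1 with rfl | hlt
            · exact ⟨h1', h2'⟩
            · exact ih (i+1) h j (by omega) (by omega)

lemma anyInv_none_spec (c1 c2 : List Char) :
    ∀ (fuel i : Nat), anyInvalidB c1 c2 fuel i = none →
      ∃ j, i ≤ j ∧ j < i + fuel ∧ (c1.length ≤ j ∨ c2.length ≤ j) ∧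
        ∀ k, i ≤ k → k < j → ¬ (c1.getD k ' ' = c2.getD k ' ' ∧ c1.getD k ' ' ≠ '?') := by
  intro fuel
  induction fuel with
  | zero => intro i h; simp [anyInvalidB] at h
  | succ fuel ih =>
      intro i h
      cases ha : PySem.List.pyGet? c1 (i : Int) with
      | none =>
        refine ⟨i, le_refl i, by omega, ?_, fun k hk1 hk2 => by omega⟩
        rw [PySem.List.pyGet?_natCast] at ha
        left
        by_contra hc
        simp [List.getElem?_eq_getElem (by omega : i < c1.length)] at ha
      | some a =>
        cases hb : PySem.List.pyGet? c2 (i : Int) with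
        | none =>
          refine ⟨i, le_refl i, by omega, ?_, fun k hk1 hk2 => by omega⟩
          rw [PySem.List.pyGet?_natCast] at hb
          right
          by_contra hc
          simp [List.getElem?_eq_getElem (by omega : i < c2.length)] at hb
        | some b =>
          simp only [anyInvalidB, ha, hb] at h
          by_cases hinv : a = b ∧ a ≠ '?'
          · rw [if_pos hinv] at h; simp at h
          · rw [if_neg hinv] at h
            obtain ⟨j, hj1, hj2, hj3, hj4⟩ := ih (i+1) h
            refine ⟨j, by omega, by omega, hj3, ?_⟩
            intro k hk1 hk2
            by_cases hik : k = i
            · subst hik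
              rw [PySem.List.pyGet?_natCast] at ha hb
              have h1' : k < c1.length := by
                by_contra hc; simp [List.getElem?_eq_none (by omega : c1.length ≤ k)] at ha
              have h2' : k < c2.length := by
                by_contra hc; simp [List.getElem?_eq_none (by omega : c2.length ≤ k)] at hb
              have ea : c1.getD k ' ' = a := by
                simp only [List.getD, List.getElem?_eq_getElem h1'] at ha ⊢
                simpa using ha
              have eb : c2.getD k ' ' = b := by
                simp only [List.getD, List.getElem?_eq_getElem h2'] at hb ⊢
                simpa using hb
              rw [ea, eb]; exact hinv
            · exact hj4 k (by omega) hk2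

-- index-based sum over range' = sum over the zipped pair list
lemma idxSum_zip (c1 c2 : List Char) (f : Char → Char → Int) :
    ∀ (fuel i : Nat), i + fuel ≤ c1.length → i + fuel ≤ c2.length →
      ((List.range' i fuel).map (fun j => f (c1.getD j ' ') (c2.getD j ' '))).sum
        = ((((c1.drop i).zip (c2.drop i)).take fuel).map (fun p => f p.1 p.2)).sum := by
  intro fuel
  induction fuel with
  | zero => intro i _ _; simp
  | succ fuel ih =>
      intro i hl1 hl2
      have h1 : i < c1.length := by omega
      have h2 : i < c2.length := by omega
      rw [List.range'_succ, List.drop_eq_getElem_cons h1, List.drop_eq_getElem_cons h2,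
        List.zip_cons_cons, List.take_succ_cons, List.map_cons, List.map_cons,
        List.sum_cons, List.sum_cons, ih (i+1) (by omega) (by omega)]
      congr 2
      · simp [List.getD, List.getElem?_eq_getElem h1]
      · simp [List.getD, List.getElem?_eq_getElem h2]

lemma filterLen_eq_sum {α : Type} (p : α → Prop) [DecidablePred p] (l : List α) :
    (((l.filter fun x => decide (p x)).length : Int)) = (l.map fun x => if p x then (1:Int) else 0).sum := by
  induction l with
  | nil => simp
  | cons x t ih =>
      by_cases h : p x <;> simp [List.filter_cons, h, ih] <;> push_cast <;> ring

-- zip-side identities: indicator sums are counts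
lemma sum_blank_eq_count (l : List (Char × Char)) :
    (l.map fun p => if p.1 = '?' ∧ p.2 = '?' then (1:Int) else 0).sum = (l.count ('?','?') : Int) := by
  induction l with
  | nil => simp
  | cons p t ih =>
      obtain ⟨a, b⟩ := p
      rw [List.map_cons, List.sum_cons, ih, List.count_cons]
      by_cases h : a = '?' ∧ b = '?'
      · obtain ⟨rfl, rfl⟩ := h; simp; ring
      · rw [if_neg h]
        have : ¬ ((a, b) == ('?','?')) = true := by
          simp only [beq_iff_eq, Prod.mk.injEq]; exact h
        simp [this]

lemma sum_net_eq_counts (l : List (Char × Char)) :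
    (l.map fun p =>
      (if p.1 = 'R' ∨ p.2 = 'W' then (1:Int) else 0) -
      (if p.1 = 'W' ∨ p.2 = 'R' then (1:Int) else 0)).sum
    = (((l.map Prod.fst).count 'R' : Int) + ((l.map Prod.snd).count 'W' : Int) - (l.count ('R','W') : Int))
      - (((l.map Prod.fst).count 'W' : Int) + ((l.map Prod.snd).count 'R' : Int) - (l.count ('W','R') : Int)) := by
  induction l with
  | nil => simp
  | cons p t ih =>
      obtain ⟨a, b⟩ := p
      rw [List.map_cons, List.sum_cons, ih]
      simp only [List.map_cons, List.count_cons, beq_iff_eq, Prod.mk.injEq]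
      push_cast
      by_cases ha1 : a = 'R' <;> by_cases ha2 : a = 'W' <;> by_cases hb1 : b = 'R' <;> by_cases hb2 : b = 'W' <;>
        simp_all <;> ring

lemma sum_repl_eq_counts (l : List (Char × Char)) :
    (l.map fun p => if ¬(p.1 = '?' ∧ p.2 = '?') ∧ ¬(p.1 = 'W' ∧ p.2 = 'R') ∧ ¬(p.1 = 'R' ∧ p.2 = 'W')
        then (1:Int) else 0).sum
    = (l.length : Int) - (l.count ('?','?') : Int) - (l.count ('W','R') : Int) - (l.count ('R','W') : Int) := by
  induction l with
  | nil => simp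
  | cons p t ih =>
      obtain ⟨a, b⟩ := p
      rw [List.map_cons, List.sum_cons, ih]
      simp only [List.count_cons, List.length_cons, beq_iff_eq, Prod.mk.injEq]
      push_cast
      by_cases h1 : a = '?' ∧ b = '?'
      · obtain ⟨rfl, rfl⟩ := h1; simp; try ring
      · by_cases h2 : a = 'W' ∧ b = 'R'
        · obtain ⟨rfl, rfl⟩ := h2; simp; try ring
        · by_cases h3 : a = 'R' ∧ b = 'W'
          · obtain ⟨rfl, rfl⟩ := h3; simp; try ring
          · rw [if_pos ⟨h1, h2, h3⟩]
            simp only [if_neg h1, if_neg h2, if_neg h3]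
            ring

lemma finish_arith (net bl rp : Int) :
    (if |net - -net| > bl * 2 then (-1:Int) else rp + |net - -net|) =
    (if |net| > bl then (-1:Int) else rp + 2 * |net|) := by
  have h : |net - -net| = 2 * |net| := by
    rw [sub_neg_eq_add, ← two_mul, abs_mul]; simp
  rw [h]
  have hm : 0 ≤ |net| := abs_nonneg net
  generalize |net| = m at *
  split_ifs <;> omega

-- ===== VERDICT (by name: the statement is the Claim_ definition above) =====
theorem solution_spec : Claim_equal_solution := by
  intro r1 r2 _ hpre
  unfold Spec_solution solution solution_alt
  dsimp only
  rw [PySem.List.slice_to_natCast]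
  have hzip : r1.toList.zip (r2.toList.take r1.toList.length)
      = (r1.toList.zip r2.toList).take r1.toList.length := by
    conv_lhs => rw [← List.take_length (l := r1.toList)]
    simp [List.zip_eq_zipWith, List.take_zipWith]
  have h := loopA_eq r1.toList r2.toList r1.toList.length 0 0 0 0
  simp only [neg_zero] at h
  rw [h]
  cases hinv : anyInvalidB r1.toList r2.toList r1.toList.length 0 with
  | none =>
      exfalso
      obtain ⟨j, hj0, hjn, hjlen, hjval⟩ := anyInv_none_spec r1.toList r2.toList _ 0 hinv
      rcases hjlen with hj | hj
      · omega
      · rcases hpre with hp | ⟨i0, hi0r, hi0n, hi0eq, hi0q⟩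
        · omega
        · rw [List.mem_range] at hi0r
          exact hjval i0 (by omega) (by omega) ⟨hi0eq, hi0q⟩
  | some v =>
    have hany := anyInv_some_any r1.toList r2.toList _ 0 v hinv
    simp only [List.drop_zero] at hany
    cases v with
    | true =>
        simp only [finishB, Option.getD_some]
        rw [hzip, hany]
        simp
    | false =>
        have hlen2 : r1.toList.length ≤ r2.toList.length := by
          rcases Nat.eq_zero_or_pos r1.toList.length with h0 | h0
          · omega
          · have := anyInv_false_inrange r1.toList r2.toList _ 0 hinv
              (r1.toList.length - 1) (by omega) (by omega)
            omega
        rw [hzip, hany]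
        simp only [Bool.false_eq_true, if_false, finishB, Option.getD_some]
        -- identify the three index-based aggregates with B's counts
        have hb : bBlank r1.toList r2.toList (List.range' 0 r1.toList.length)
            = (((r1.toList.zip r2.toList).take r1.toList.length).count ('?','?') : Int) := by
          rw [bBlank, filterLen_eq_sum,
            idxSum_zip r1.toList r2.toList
              (fun a b => if a = '?' ∧ b = '?' then (1:Int) else 0)
              r1.toList.length 0 (by omega) (by omega)]
          simp only [List.drop_zero]
          exact sum_blank_eq_count _
        have hr : bRepl r1.toList r2.toList (List.range' 0 r1.toList.length)
            = ((((r1.toList.zip r2.toList).take r1.toList.length).length : Int)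
               - (((r1.toList.zip r2.toList).take r1.toList.length).count ('?','?') : Int)
               - (((r1.toList.zip r2.toList).take r1.toList.length).count ('W','R') : Int)
               - (((r1.toList.zip r2.toList).take r1.toList.length).count ('R','W') : Int)) := by
          rw [bRepl, filterLen_eq_sum,
            idxSum_zip r1.toList r2.toList
              (fun a b => if ¬(a = '?' ∧ b = '?') ∧ ¬(a = 'W' ∧ b = 'R') ∧ ¬(a = 'R' ∧ b = 'W')
                then (1:Int) else 0)
              r1.toList.length 0 (by omega) (by omega)]
          simp only [List.drop_zero]
          exact sum_repl_eq_counts _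
        have hfst : ((r1.toList.zip r2.toList).take r1.toList.length).map Prod.fst = r1.toList := by
          rw [← hzip]
          exact List.map_fst_zip (by rw [List.length_take]; omega)
        have hsnd : ((r1.toList.zip r2.toList).take r1.toList.length).map Prod.snd
            = r2.toList.take r1.toList.length := by
          rw [← hzip]
          exact List.map_snd_zip (by rw [List.length_take]; omega)
        have hn : bNet r1.toList r2.toList (List.range' 0 r1.toList.length)
            = (((r1.toList.count 'R' : Int) + ((r2.toList.take r1.toList.length).count 'W' : Int)
                - (((r1.toList.zip r2.toList).take r1.toList.length).count ('R','W') : Int))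
              - ((r1.toList.count 'W' : Int) + ((r2.toList.take r1.toList.length).count 'R' : Int)
                - (((r1.toList.zip r2.toList).take r1.toList.length).count ('W','R') : Int))) := by
          rw [bNet, idxSum_zip r1.toList r2.toList
              (fun a b => (if a = 'R' ∨ b = 'W' then (1:Int) else 0) -
                (if a = 'W' ∨ b = 'R' then (1:Int) else 0))
              r1.toList.length 0 (by omega) (by omega)]
          simp only [List.drop_zero]
          rw [sum_net_eq_counts, hfst, hsnd]
        have hlenN : ((r1.toList.zip r2.toList).take r1.toList.length).length
            = r1.toList.length := by
          rw [List.length_take, List.length_zip]; omega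
        simp only [zero_add]
        rw [hb, hr, hn, hlenN, finish_arith]
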